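-- pv_equiv track=rewrite | github.com/kimSR0916/study | Python3/프로그래머스/1/82612. 부족한 금액 계산하기/부족한 금액 계산하기.py | solution
-- ===== SOURCE A (Python) =====
-- def solution(price, money, count):
--     answer = 0
--
--     total = 0
--
--     for i in range (1, count + 1):
--         total += price * i
--
--     if money - total < 0:
--         answer = total - money
--
--     return answer
-- ===== SOURCE B (Python) =====
-- def solution(price, money, count):
--     n = max(count, 0)
--     cost = price * n * (n + 1) // 2
--     return max(cost - money, 0)
-- ===== Notes on version B (the rewrite author's own statement) =====
-- stated objective: faster
-- what changed: Replaced the O(count) accumulation loop and branch by the closed-form triangular sum price*n*(n+1)//2 (n = max(count,0)) and a max with 0.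
import Mathlib
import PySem

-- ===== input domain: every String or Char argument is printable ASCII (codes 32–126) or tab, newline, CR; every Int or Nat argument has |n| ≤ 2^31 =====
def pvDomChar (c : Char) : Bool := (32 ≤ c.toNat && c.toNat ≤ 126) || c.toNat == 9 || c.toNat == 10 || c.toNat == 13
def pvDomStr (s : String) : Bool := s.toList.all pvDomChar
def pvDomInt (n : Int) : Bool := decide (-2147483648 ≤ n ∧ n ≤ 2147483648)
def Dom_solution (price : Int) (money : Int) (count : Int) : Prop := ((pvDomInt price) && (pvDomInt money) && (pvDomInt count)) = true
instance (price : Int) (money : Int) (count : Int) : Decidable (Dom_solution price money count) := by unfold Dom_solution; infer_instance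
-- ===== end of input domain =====

-- B replaces A's O(count) accumulation loop by the closed-form triangular sum with max(count,0) purchases (faster, asymptotic).

-- ===== PORT A =====
def solution (price : Int) (money : Int) (count : Int) : Int :=
  let total := (PySem.List.pyRange 1 (count + 1) 1).foldl (fun t i => t + price * i) 0
  if money - total < 0 then total - money else 0

-- ===== PORT B =====
def solution_alt (price : Int) (money : Int) (count : Int) : Int :=
  let n := max count 0
  let cost := PySem.Int.floordiv (price * n * (n + 1)) 2
  max (cost - money) 0

-- ===== PRECONDITION & SPEC =====
def Spec_solution (price : Int) (money : Int) (count : Int) (out : Int) : Prop := out = solution_alt price money count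
instance (price : Int) (money : Int) (count : Int) (out : Int) : Decidable (Spec_solution price money count out) := by unfold Spec_solution; infer_instance

-- ===== CLAIM (what is proved, stated in full; the proofs are below) =====
def Claim_equal_solution : Prop := ∀ (price : Int) (money : Int) (count : Int), Dom_solution price money count → Spec_solution price money count (solution price money count)

-- ===== LEMMAS AND PROOFS =====

theorem sum_pyRange_triangle (price : Int) : ∀ n : Nat,
    (PySem.List.pyRange 1 ((n : Int) + 1) 1).foldl (fun t i => t + price * i) 0
      = price * n * (n + 1) / 2 := by
  intro n
  induction n with
  | zero => simp [PySem.List.pyRange_one_eq_nil]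
  | succ n ih =>
      have h : PySem.List.pyRange 1 ((n : Int) + 1 + 1) 1
          = PySem.List.pyRange 1 ((n : Int) + 1) 1 ++ [(n : Int) + 1] :=
        PySem.List.pyRange_one_succ_right (by omega)
      push_cast
      rw [h, List.foldl_append, ih]
      simp only [List.foldl_cons, List.foldl_nil]
      obtain ⟨k, hk⟩ := Int.even_mul_succ_self (n : Int)
      have e1 : price * (n : Int) * ((n : Int) + 1) / 2 = price * k := by
        have : price * (n : Int) * ((n : Int) + 1) = 2 * (price * k) := by
          rw [mul_assoc, hk]; ring
        rw [this, Int.mul_ediv_cancel_left _ two_ne_zero]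
      have e2 : price * ((n : Int) + 1) * ((n : Int) + 1 + 1) / 2
          = price * (k + (n : Int) + 1) := by
        have : price * ((n : Int) + 1) * ((n : Int) + 1 + 1) = 2 * (price * (k + (n : Int) + 1)) := by
          have h3 : ((n : Int) + 1) * ((n : Int) + 1 + 1) = (n : Int) * ((n : Int) + 1) + 2 * ((n : Int) + 1) := by ring
          rw [mul_assoc, h3, hk]; ring
        rw [this, Int.mul_ediv_cancel_left _ two_ne_zero]
      rw [e1, e2]
      ring

theorem totals_eq (price count : Int) :
    (PySem.List.pyRange 1 (count + 1) 1).foldl (fun t i => t + price * i) 0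
      = PySem.Int.floordiv (price * max count 0 * (max count 0 + 1)) 2 := by
  rw [PySem.Int.floordiv_eq_ediv_of_pos (by norm_num)]
  by_cases hc : count > 0
  · have hm : max count 0 = count := max_eq_left (le_of_lt hc)
    rw [hm]
    have hcn : ((count.toNat : Int)) = count := Int.toNat_of_nonneg (le_of_lt hc)
    calc (PySem.List.pyRange 1 (count + 1) 1).foldl (fun t i => t + price * i) 0
        = (PySem.List.pyRange 1 ((count.toNat : Int) + 1) 1).foldl (fun t i => t + price * i) 0 := by rw [hcn]
      _ = price * count.toNat * (count.toNat + 1) / 2 := sum_pyRange_triangle price count.toNat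
      _ = price * count * (count + 1) / 2 := by rw [hcn]
  · have hm : max count 0 = 0 := max_eq_right (by omega)
    rw [hm, PySem.List.pyRange_one_eq_nil (by omega)]
    simp

-- ===== VERDICT (by name: the statement is the Claim_ definition above) =====
theorem solution_spec : Claim_equal_solution := by
  intro price money count _
  unfold Spec_solution solution solution_alt
  rw [totals_eq]
  set t := PySem.Int.floordiv (price * max count 0 * (max count 0 + 1)) 2 with ht
  by_cases h : money - t < 0
  · rw [if_pos h, max_eq_left (by omega)]
  · rw [if_neg h, max_eq_right (by omega)]
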